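-- pv_equiv track=rewrite | github.com/portalnexus/MATEMATICA | fix-html-issues.py | fix_hardcoded_colors
-- ===== SOURCE A (Python) =====
-- def fix_hardcoded_colors(content):
--     """Substitui cores hard-coded por variáveis CSS"""
--     replacements = [
--         ('border-left-color: #2196f3;', 'border-left-color: var(--teorema-color);'),
--         ('border-left-color: #ff9800;', 'border-left-color: var(--observacao-color);'),
--         ('color: #ffc107;', 'color: var(--dica-color);'),
--         ('background-color: rgba(255, 193, 7, 0.15);', 'background-color: rgba(255, 193, 7, 0.15);'),  # Keep rgba
--     ]
--
--     modified = False
--     for old, new in replacements: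
--         if old in content and old != new:
--             content = content.replace(old, new)
--             modified = True
--
--     return content, modified
-- ===== SOURCE B (Python) =====
-- def fix_hardcoded_colors(content):
--     """Substitui cores hard-coded por variáveis CSS"""
--     # single left-to-right scan with a substitution table (identity rgba entry dropped),
--     # instead of four sequential full-content replace passes
--     table = [
--         ('border-left-color: #2196f3;', 'border-left-color: var(--teorema-color);'),
--         ('border-left-color: #ff9800;', 'border-left-color: var(--observacao-color);'),
--         ('color: #ffc107;', 'color: var(--dica-color);'),
--     ]
--     out = []
--     i = 0
--     n = len(content)
--     modified = False
--     while i < n: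
--         for old, new in table:
--             if content.startswith(old, i):
--                 out.append(new)
--                 i += len(old)
--                 modified = True
--                 break
--         else:
--             out.append(content[i])
--             i += 1
--     return ''.join(out), modified
-- ===== Notes on version B (the rewrite author's own statement) =====
-- stated objective: alternative
-- what changed: Replaces A's four sequential full-content replace passes (with membership pre-checks) by one left-to-right scan that consults a substitution table at each position, building the output and the modified flag in a single pass.
import Mathlib
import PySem

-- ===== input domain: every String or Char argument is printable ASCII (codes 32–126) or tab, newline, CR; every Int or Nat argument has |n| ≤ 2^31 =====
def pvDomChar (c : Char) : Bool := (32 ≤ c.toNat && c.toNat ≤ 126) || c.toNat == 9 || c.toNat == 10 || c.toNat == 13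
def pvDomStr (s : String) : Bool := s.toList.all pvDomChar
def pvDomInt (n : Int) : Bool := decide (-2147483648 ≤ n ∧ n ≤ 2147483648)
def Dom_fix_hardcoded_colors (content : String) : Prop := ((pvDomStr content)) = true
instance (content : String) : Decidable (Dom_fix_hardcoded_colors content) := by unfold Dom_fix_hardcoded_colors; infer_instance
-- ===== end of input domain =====

-- B replaces A's four sequential full-content replace passes by one left-to-right
-- scan over a substitution table; equivalence is proved for all strings (A is total).

-- ===== PORT A =====
-- literal port of A: a fold over the 4-entry replacement list; 'old in content' is
-- PySem.Str.isIn, 'content.replace(old, new)' is PySem.Str.replace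
def fix_hardcoded_colors (content : String) : String × Bool :=
  let replacements : List (String × String) :=
    [("border-left-color: #2196f3;", "border-left-color: var(--teorema-color);"),
     ("border-left-color: #ff9800;", "border-left-color: var(--observacao-color);"),
     ("color: #ffc107;", "color: var(--dica-color);"),
     ("background-color: rgba(255, 193, 7, 0.15);", "background-color: rgba(255, 193, 7, 0.15);")]
  replacements.foldl
    (fun (st : String × Bool) (pr : String × String) =>
      if PySem.Str.isIn pr.1 st.1 && pr.1 != pr.2 then (PySem.Str.replace st.1 pr.1 pr.2, true)
      else st)
    (content, false)

-- ===== PORT B =====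
-- Source B's substitution table (the identity rgba entry of A is not in it)
def pvOld1 : List Char := "border-left-color: #2196f3;".toList
def pvNew1 : List Char := "border-left-color: var(--teorema-color);".toList
def pvOld2 : List Char := "border-left-color: #ff9800;".toList
def pvNew2 : List Char := "border-left-color: var(--observacao-color);".toList
def pvOld3 : List Char := "color: #ffc107;".toList
def pvNew3 : List Char := "color: var(--dica-color);".toList

-- port of Source B's while-loop: one left-to-right scan; at each position the three
-- table entries are tried in order (content.startswith(old, i) = List.isPrefixOf
-- on the remaining characters, i += len(old) = dropping the matched characters),
-- otherwise the character at i is copied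
def pvScanB : List Char → List Char × Bool
  | [] => ([], false)
  | c :: t =>
    if pvOld1.isPrefixOf (c :: t) then
      let r := pvScanB (t.drop (pvOld1.length - 1))
      (pvNew1 ++ r.1, true)
    else if pvOld2.isPrefixOf (c :: t) then
      let r := pvScanB (t.drop (pvOld2.length - 1))
      (pvNew2 ++ r.1, true)
    else if pvOld3.isPrefixOf (c :: t) then
      let r := pvScanB (t.drop (pvOld3.length - 1))
      (pvNew3 ++ r.1, true)
    else
      let r := pvScanB t
      (c :: r.1, r.2)
termination_by l => l.length
decreasing_by all_goals simp

def fix_hardcoded_colors_alt (content : String) : String × Bool :=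
  let r := pvScanB content.toList
  (String.ofList r.1, r.2)

-- ===== PRECONDITION & SPEC =====
def Spec_fix_hardcoded_colors (content : String) (out : String × Bool) : Prop := out = fix_hardcoded_colors_alt content
instance (content : String) (out : String × Bool) : Decidable (Spec_fix_hardcoded_colors content out) := by unfold Spec_fix_hardcoded_colors; infer_instance

-- ===== CLAIM (what is proved, stated in full; the proofs are below) =====
def Claim_equal_fix_hardcoded_colors : Prop := ∀ (content : String), Dom_fix_hardcoded_colors content → Spec_fix_hardcoded_colors content (fix_hardcoded_colors content)

-- ===== LEMMAS AND PROOFS =====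

-- clean structural form of Python's str.replace (nonempty pattern)
def pvRep (old new : List Char) : List Char → List Char
  | [] => []
  | c :: t =>
    if old.isPrefixOf (c :: t) then new ++ pvRep old new (t.drop (old.length - 1))
    else c :: pvRep old new t
termination_by l => l.length
decreasing_by all_goals simp

theorem pvRep_cons_pos {old new : List Char} {c : Char} {t : List Char}
    (h : old.isPrefixOf (c :: t) = true) :
    pvRep old new (c :: t) = new ++ pvRep old new (t.drop (old.length - 1)) := by
  rw [pvRep]; simp [h]

theorem pvRep_cons_neg {old new : List Char} {c : Char} {t : List Char}
    (h : ¬ old.isPrefixOf (c :: t) = true) :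
    pvRep old new (c :: t) = c :: pvRep old new t := by
  rw [pvRep]; simp [h]

-- PySem.Chars.replace.go agrees with pvRep (nonempty pattern, enough fuel)
theorem pvGo_eq (old new : List Char) (hold : old ≠ []) :
    ∀ fuel (l acc : List Char), l.length ≤ fuel →
      PySem.Chars.replace.go old new fuel l acc = acc.reverse ++ pvRep old new l := by
  intro fuel
  induction fuel with
  | zero =>
    intro l acc hl
    have : l = [] := by cases l <;> simp_all
    subst this
    simp [PySem.Chars.replace.go, pvRep]
  | succ n ih =>
    intro l acc hl
    cases l with
    | nil => simp [PySem.Chars.replace.go, pvRep]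
    | cons c t =>
      by_cases h : old.isPrefixOf (c :: t) = true
      · rw [PySem.Chars.replace.go]
        simp only [h, if_pos]
        rw [ih _ _ (by cases old with
              | nil => exact absurd rfl hold
              | cons o os => simp at hl ⊢; omega)]
        rw [pvRep_cons_pos h]
        cases old with
        | nil => exact absurd rfl hold
        | cons o os => simp
      · rw [PySem.Chars.replace.go]
        simp only [h, if_neg, Bool.not_eq_true]
        rw [ih t (c :: acc) (by simp at hl ⊢; omega)]
        rw [pvRep_cons_neg h]
        simp

theorem pvReplace_eq (s old new : List Char) (hold : old ≠ []) :
    PySem.Chars.replace s old new = pvRep old new s := by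
  rw [PySem.Chars.replace]
  have : old.isEmpty = false := by cases old <;> simp_all
  rw [this]
  simpa using pvGo_eq old new hold s.length s [] le_rfl

-- a prefix of R ++ X is comparable with R
theorem pvPrefix_append (P R X : List Char) (h : P <+: R ++ X) :
    P <+: R ∨ R <+: P := by
  by_cases hl : P.length ≤ R.length
  · left
    have h1 : (R ++ X).take P.length = P := by
      obtain ⟨s, hs⟩ := h
      rw [← hs]; simp
    rw [List.take_append_of_le_length hl] at h1
    rw [← h1]; exact List.take_prefix _ _
  · right
    have h1 : (R ++ X).take R.length = R := by simp
    obtain ⟨s, hs⟩ := h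
    rw [← hs, List.take_append_of_le_length (by omega)] at h1
    rw [← h1]; exact List.take_prefix _ _

-- pvRep commutes with prepending R when the pattern can start nowhere in R
theorem pvRep_append (P Q R X : List Char)
    (H : ∀ i < R.length, ¬ (R.drop i <+: P ∨ P <+: R.drop i)) :
    pvRep P Q (R ++ X) = R ++ pvRep P Q X := by
  induction R with
  | nil => simp
  | cons a R' ih =>
    have h0 := H 0 (by simp)
    simp only [List.drop_zero] at h0
    have hnp : ¬ P.isPrefixOf (a :: (R' ++ X)) = true := by
      intro hp
      rw [List.isPrefixOf_iff_prefix] at hp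
      exact h0 (Or.symm (pvPrefix_append P (a :: R') X hp))
    rw [List.cons_append, pvRep_cons_neg hnp, ih (fun i hi => H (i + 1) (by simp; omega))]
    simp

-- replacing the pattern at the head of old ++ X
theorem pvRep_self (old new X : List Char) (h : old ≠ []) :
    pvRep old new (old ++ X) = new ++ pvRep old new X := by
  cases old with
  | nil => exact absurd rfl h
  | cons o os =>
    have hpre : (o :: os).isPrefixOf (o :: (os ++ X)) = true := by
      rw [List.isPrefixOf_iff_prefix, ← List.cons_append]
      exact List.prefix_append (o :: os) X
    rw [List.cons_append, pvRep_cons_pos hpre]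
    simp

-- pvRep creates no new occurrence of S at the head when S cannot overlap the
-- replacement text Q
theorem pvNotPrefix_rep (P Q : List Char) :
    ∀ l S, (∀ j < S.length, ¬ (S.drop j <+: Q ∨ Q <+: S.drop j)) →
      ¬ S <+: l → ¬ S <+: pvRep P Q l := by
  intro l
  induction l using pvRep.induct P with
  | case1 =>
    intro S H h hc
    simp [pvRep] at hc
    subst hc
    exact h (List.nil_prefix)
  | case2 c t hp ih =>
    intro S H h hc
    rw [pvRep_cons_pos hp] at hc
    have hS : S ≠ [] := by rintro rfl; exact h List.nil_prefix
    have h0 := H 0 (by cases S <;> simp_all)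
    simp only [List.drop_zero] at h0
    exact h0 (pvPrefix_append S Q _ hc)
  | case3 c t hp ih =>
    intro S H h hc
    rw [pvRep_cons_neg hp] at hc
    cases S with
    | nil => exact h List.nil_prefix
    | cons s S' =>
      rw [List.cons_prefix_cons] at hc
      obtain ⟨rfl, hc'⟩ := hc
      have h' : ¬ (S' <+: t) := by
        intro hx
        exact h (List.cons_prefix_cons.mpr ⟨rfl, hx⟩)
      exact ih S' (fun j hj => H (j + 1) (by simp; omega)) h' hc'

-- a no-match head position passes through isIn unchanged
theorem pvIsIn_cons (S : List Char) (c : Char) (t : List Char)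
    (h : ¬ S <+: (c :: t)) :
    PySem.Chars.isIn S (c :: t) = PySem.Chars.isIn S t := by
  rw [Bool.eq_iff_iff, PySem.Chars.isIn_iff_infix, PySem.Chars.isIn_iff_infix,
      List.infix_cons_iff]
  constructor
  · rintro (hx | hx)
    · exact absurd hx h
    · exact hx
  · exact Or.inr

-- pattern not in l → pvRep is the identity
theorem pvRep_id (P Q : List Char) :
    ∀ l, PySem.Chars.isIn P l = false → pvRep P Q l = l := by
  intro l
  induction l using pvRep.induct P with
  | case1 => simp [pvRep]
  | case2 c t hp ih =>
    intro h
    rw [PySem.Chars.isIn_eq_false_iff] at h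
    exact absurd ((List.isPrefixOf_iff_prefix.mp hp).isInfix) h
  | case3 c t hp ih =>
    intro h
    rw [pvRep_cons_neg hp, ih]
    rw [PySem.Chars.isIn_eq_false_iff] at h ⊢
    intro hx
    exact h (hx.trans (List.suffix_cons c t).isInfix)

-- the non-overlap facts between the table entries, all checked by computation
theorem pvNoOv_N1O2 : ∀ i < pvNew1.length, ¬ (pvNew1.drop i <+: pvOld2 ∨ pvOld2 <+: pvNew1.drop i) := by decide
theorem pvNoOv_N1O3 : ∀ i < pvNew1.length, ¬ (pvNew1.drop i <+: pvOld3 ∨ pvOld3 <+: pvNew1.drop i) := by decide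
theorem pvNoOv_N2O3 : ∀ i < pvNew2.length, ¬ (pvNew2.drop i <+: pvOld3 ∨ pvOld3 <+: pvNew2.drop i) := by decide
theorem pvNoOv_O2O1 : ∀ i < pvOld2.length, ¬ (pvOld2.drop i <+: pvOld1 ∨ pvOld1 <+: pvOld2.drop i) := by decide
theorem pvNoOv_O3O1 : ∀ i < pvOld3.length, ¬ (pvOld3.drop i <+: pvOld1 ∨ pvOld1 <+: pvOld3.drop i) := by decide
theorem pvNoOv_O3O2 : ∀ i < pvOld3.length, ¬ (pvOld3.drop i <+: pvOld2 ∨ pvOld2 <+: pvOld3.drop i) := by decide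
theorem pvNoOv_O2N1 : ∀ j < pvOld2.length, ¬ (pvOld2.drop j <+: pvNew1 ∨ pvNew1 <+: pvOld2.drop j) := by decide
theorem pvNoOv_O3N1 : ∀ j < pvOld3.length, ¬ (pvOld3.drop j <+: pvNew1 ∨ pvNew1 <+: pvOld3.drop j) := by decide
theorem pvNoOv_O3N2 : ∀ j < pvOld3.length, ¬ (pvOld3.drop j <+: pvNew2 ∨ pvNew2 <+: pvOld3.drop j) := by decide

-- splitting off a matched prefix
theorem pvSplit {S : List Char} {c : Char} {t : List Char} {n : Nat}
    (h : S.isPrefixOf (c :: t) = true) (hn : S.length = n + 1) :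
    c :: t = S ++ t.drop n := by
  obtain ⟨X, hX⟩ := List.isPrefixOf_iff_prefix.mp h
  have h2 : (S ++ X).drop S.length = X := List.drop_left
  rw [hX, hn, List.drop_succ_cons] at h2
  rw [← hX, h2]

-- THE CORE: the three sequential replaces equal the single scan, value and flag
theorem pvMain : ∀ l : List Char,
    pvRep pvOld3 pvNew3 (pvRep pvOld2 pvNew2 (pvRep pvOld1 pvNew1 l)) = (pvScanB l).1 ∧
    (PySem.Chars.isIn pvOld1 l ||
     PySem.Chars.isIn pvOld2 (pvRep pvOld1 pvNew1 l) ||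
     PySem.Chars.isIn pvOld3 (pvRep pvOld2 pvNew2 (pvRep pvOld1 pvNew1 l))) = (pvScanB l).2 := by
  intro l
  induction l using pvScanB.induct with
  | case1 =>
    refine ⟨by simp [pvScanB, pvRep], ?_⟩
    simp only [pvScanB, pvRep]
    decide
  | case2 c t h1 ih =>
    obtain ⟨ihc, ihf⟩ := ih
    have e1 : pvRep pvOld1 pvNew1 (c :: t)
        = pvNew1 ++ pvRep pvOld1 pvNew1 (t.drop (pvOld1.length - 1)) := pvRep_cons_pos h1
    have e2 : pvRep pvOld2 pvNew2 (pvRep pvOld1 pvNew1 (c :: t))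
        = pvNew1 ++ pvRep pvOld2 pvNew2 (pvRep pvOld1 pvNew1 (t.drop (pvOld1.length - 1))) := by
      rw [e1]; exact pvRep_append _ _ _ _ pvNoOv_N1O2
    have e3 : pvRep pvOld3 pvNew3 (pvRep pvOld2 pvNew2 (pvRep pvOld1 pvNew1 (c :: t)))
        = pvNew1 ++ pvRep pvOld3 pvNew3 (pvRep pvOld2 pvNew2 (pvRep pvOld1 pvNew1 (t.drop (pvOld1.length - 1)))) := by
      rw [e2]; exact pvRep_append _ _ _ _ pvNoOv_N1O3
    have es : pvScanB (c :: t) = (pvNew1 ++ (pvScanB (t.drop (pvOld1.length - 1))).1, true) := by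
      rw [pvScanB]; simp only [h1, if_pos]
    constructor
    · rw [e3, ihc, es]
    · rw [es]
      have : PySem.Chars.isIn pvOld1 (c :: t) = true := by
        rw [PySem.Chars.isIn_iff_infix]
        exact (List.isPrefixOf_iff_prefix.mp h1).isInfix
      simp [this]
  | case3 c t h1 h2 ih =>
    obtain ⟨ihc, ihf⟩ := ih
    have hs : c :: t = pvOld2 ++ t.drop (pvOld2.length - 1) := pvSplit h2 (by decide)
    have e1 : pvRep pvOld1 pvNew1 (c :: t)
        = pvOld2 ++ pvRep pvOld1 pvNew1 (t.drop (pvOld2.length - 1)) := by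
      rw [hs]; exact pvRep_append _ _ _ _ pvNoOv_O2O1
    have e2 : pvRep pvOld2 pvNew2 (pvRep pvOld1 pvNew1 (c :: t))
        = pvNew2 ++ pvRep pvOld2 pvNew2 (pvRep pvOld1 pvNew1 (t.drop (pvOld2.length - 1))) := by
      rw [e1]; exact pvRep_self _ _ _ (by decide)
    have e3 : pvRep pvOld3 pvNew3 (pvRep pvOld2 pvNew2 (pvRep pvOld1 pvNew1 (c :: t)))
        = pvNew2 ++ pvRep pvOld3 pvNew3 (pvRep pvOld2 pvNew2 (pvRep pvOld1 pvNew1 (t.drop (pvOld2.length - 1)))) := by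
      rw [e2]; exact pvRep_append _ _ _ _ pvNoOv_N2O3
    have es : pvScanB (c :: t) = (pvNew2 ++ (pvScanB (t.drop (pvOld2.length - 1))).1, true) := by
      rw [pvScanB]; simp only [h1, h2, if_pos, if_neg, Bool.not_eq_true]
    constructor
    · rw [e3, ihc, es]
    · rw [es]
      have : PySem.Chars.isIn pvOld2 (pvRep pvOld1 pvNew1 (c :: t)) = true := by
        rw [e1, PySem.Chars.isIn_iff_infix]
        exact (List.prefix_append pvOld2 _).isInfix
      simp [this]
  | case4 c t h1 h2 h3 ih =>
    obtain ⟨ihc, ihf⟩ := ih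
    have hs : c :: t = pvOld3 ++ t.drop (pvOld3.length - 1) := pvSplit h3 (by decide)
    have e1 : pvRep pvOld1 pvNew1 (c :: t)
        = pvOld3 ++ pvRep pvOld1 pvNew1 (t.drop (pvOld3.length - 1)) := by
      rw [hs]; exact pvRep_append _ _ _ _ pvNoOv_O3O1
    have e2 : pvRep pvOld2 pvNew2 (pvRep pvOld1 pvNew1 (c :: t))
        = pvOld3 ++ pvRep pvOld2 pvNew2 (pvRep pvOld1 pvNew1 (t.drop (pvOld3.length - 1))) := by
      rw [e1]; exact pvRep_append _ _ _ _ pvNoOv_O3O2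
    have e3 : pvRep pvOld3 pvNew3 (pvRep pvOld2 pvNew2 (pvRep pvOld1 pvNew1 (c :: t)))
        = pvNew3 ++ pvRep pvOld3 pvNew3 (pvRep pvOld2 pvNew2 (pvRep pvOld1 pvNew1 (t.drop (pvOld3.length - 1)))) := by
      rw [e2]; exact pvRep_self _ _ _ (by decide)
    have es : pvScanB (c :: t) = (pvNew3 ++ (pvScanB (t.drop (pvOld3.length - 1))).1, true) := by
      rw [pvScanB]; simp only [h1, h2, h3, if_pos, if_neg, Bool.not_eq_true]
    constructor
    · rw [e3, ihc, es]
    · rw [es]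
      have : PySem.Chars.isIn pvOld3 (pvRep pvOld2 pvNew2 (pvRep pvOld1 pvNew1 (c :: t))) = true := by
        rw [e2, PySem.Chars.isIn_iff_infix]
        exact (List.prefix_append pvOld3 _).isInfix
      simp [this]
  | case5 c t h1 h2 h3 ih =>
    obtain ⟨ihc, ihf⟩ := ih
    have p1 : ¬ pvOld1 <+: (c :: t) := fun hx => h1 (List.isPrefixOf_iff_prefix.mpr hx)
    have p2 : ¬ pvOld2 <+: (c :: t) := fun hx => h2 (List.isPrefixOf_iff_prefix.mpr hx)
    have p3 : ¬ pvOld3 <+: (c :: t) := fun hx => h3 (List.isPrefixOf_iff_prefix.mpr hx)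
    have e1 : pvRep pvOld1 pvNew1 (c :: t) = c :: pvRep pvOld1 pvNew1 t := pvRep_cons_neg h1
    have n2 : ¬ pvOld2 <+: (c :: pvRep pvOld1 pvNew1 t) := by
      rw [← e1]; exact pvNotPrefix_rep pvOld1 pvNew1 (c :: t) pvOld2 pvNoOv_O2N1 p2
    have e2 : pvRep pvOld2 pvNew2 (c :: pvRep pvOld1 pvNew1 t)
        = c :: pvRep pvOld2 pvNew2 (pvRep pvOld1 pvNew1 t) :=
      pvRep_cons_neg (fun hx => n2 (List.isPrefixOf_iff_prefix.mp hx))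
    have n3a : ¬ pvOld3 <+: pvRep pvOld1 pvNew1 (c :: t) :=
      pvNotPrefix_rep pvOld1 pvNew1 (c :: t) pvOld3 pvNoOv_O3N1 p3
    have n3 : ¬ pvOld3 <+: (c :: pvRep pvOld2 pvNew2 (pvRep pvOld1 pvNew1 t)) := by
      rw [← e2, ← e1]
      exact pvNotPrefix_rep pvOld2 pvNew2 _ pvOld3 pvNoOv_O3N2 (by rw [e1] at n3a ⊢; exact n3a)
    have e3 : pvRep pvOld3 pvNew3 (c :: pvRep pvOld2 pvNew2 (pvRep pvOld1 pvNew1 t))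
        = c :: pvRep pvOld3 pvNew3 (pvRep pvOld2 pvNew2 (pvRep pvOld1 pvNew1 t)) :=
      pvRep_cons_neg (fun hx => n3 (List.isPrefixOf_iff_prefix.mp hx))
    have es : pvScanB (c :: t) = (c :: (pvScanB t).1, (pvScanB t).2) := by
      rw [pvScanB]; simp only [h1, h2, h3, if_neg, Bool.not_eq_true]
    constructor
    · rw [e1, e2, e3, ihc, es]
    · rw [es]
      rw [pvIsIn_cons pvOld1 c t p1, e1, pvIsIn_cons pvOld2 _ _ n2, e2,
          pvIsIn_cons pvOld3 _ _ n3]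
      exact ihf

-- A's conditional replace step, rewritten unconditionally
theorem pvStepA (P Q : String) (hPQ : (P != Q) = true) (hP : P.toList ≠ []) (s : String) (b : Bool) :
    (if PySem.Str.isIn P s && (P != Q) then (PySem.Str.replace s P Q, true) else (s, b))
      = (PySem.Str.replace s P Q, b || PySem.Str.isIn P s) := by
  have hne : P ≠ Q := by intro e; subst e; simp at hPQ
  have hne : P ≠ Q := by intro e; subst e; simp at hPQ
  by_cases h : PySem.Chars.isIn P.toList s.toList = true
  · simp [h, hne]
  · have hfalse : PySem.Chars.isIn P.toList s.toList = false := by simpa using h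
    have hid : PySem.Str.replace s P Q = s := by
      unfold PySem.Str.replace
      rw [pvReplace_eq _ _ _ hP, pvRep_id _ _ _ hfalse]
      exact String.ofList_toList
    simp [hfalse, hid]

-- ===== VERDICT (by name: the statement is the Claim_ definition above) =====
theorem fix_hardcoded_colors_spec : Claim_equal_fix_hardcoded_colors := by
  intro content _
  unfold Spec_fix_hardcoded_colors
  unfold fix_hardcoded_colors fix_hardcoded_colors_alt
  simp only [List.foldl]
  simp only [pvStepA "border-left-color: #2196f3;" "border-left-color: var(--teorema-color);" (by decide) (by decide),
      pvStepA "border-left-color: #ff9800;" "border-left-color: var(--observacao-color);" (by decide) (by decide),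
      pvStepA "color: #ffc107;" "color: var(--dica-color);" (by decide) (by decide),
      bne_self_eq_false, Bool.and_false, Bool.false_eq_true, if_false]
  obtain ⟨hc, hf⟩ := pvMain content.toList
  have e : (PySem.Str.replace
      (PySem.Str.replace (PySem.Str.replace content "border-left-color: #2196f3;"
          "border-left-color: var(--teorema-color);") "border-left-color: #ff9800;"
          "border-left-color: var(--observacao-color);") "color: #ffc107;"
          "color: var(--dica-color);").toList = (pvScanB content.toList).1 := by
    simp only [PySem.Str.toList_replace]
    rw [pvReplace_eq _ _ _ (by decide), pvReplace_eq _ _ _ (by decide),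
        pvReplace_eq _ _ _ (by decide)]
    show pvRep pvOld3 pvNew3 (pvRep pvOld2 pvNew2 (pvRep pvOld1 pvNew1 content.toList)) = _
    exact hc
  refine Prod.ext ?_ ?_
  · show _ = String.ofList (pvScanB content.toList).1
    rw [← e, String.ofList_toList]
  · show _ = (pvScanB content.toList).2
    have e1 : (PySem.Str.replace content "border-left-color: #2196f3;"
        "border-left-color: var(--teorema-color);").toList
        = pvRep pvOld1 pvNew1 content.toList := by
      simp only [PySem.Str.toList_replace]
      rw [pvReplace_eq _ _ _ (by decide)]
      rfl
    have e2 : (PySem.Str.replace (PySem.Str.replace content "border-left-color: #2196f3;"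
        "border-left-color: var(--teorema-color);") "border-left-color: #ff9800;"
        "border-left-color: var(--observacao-color);").toList
        = pvRep pvOld2 pvNew2 (pvRep pvOld1 pvNew1 content.toList) := by
      simp only [PySem.Str.toList_replace]
      rw [pvReplace_eq _ _ _ (by decide), pvReplace_eq _ _ _ (by decide)]
      rfl
    show ((false || PySem.Str.isIn _ content || PySem.Str.isIn _ _) || PySem.Str.isIn _ _) = _
    simp only [Bool.false_or]
    have u1 : PySem.Str.isIn "border-left-color: #2196f3;" content
        = PySem.Chars.isIn pvOld1 content.toList := rfl
    have u2 : PySem.Str.isIn "border-left-color: #ff9800;" (PySem.Str.replace content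
        "border-left-color: #2196f3;" "border-left-color: var(--teorema-color);")
        = PySem.Chars.isIn pvOld2 (pvRep pvOld1 pvNew1 content.toList) := by
      show PySem.Chars.isIn _ _ = _
      rw [e1]
      rfl
    have u3 : PySem.Str.isIn "color: #ffc107;" (PySem.Str.replace (PySem.Str.replace content
        "border-left-color: #2196f3;" "border-left-color: var(--teorema-color);")
        "border-left-color: #ff9800;" "border-left-color: var(--observacao-color);")
        = PySem.Chars.isIn pvOld3 (pvRep pvOld2 pvNew2 (pvRep pvOld1 pvNew1 content.toList)) := by
      show PySem.Chars.isIn _ _ = _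
      rw [e2]
      rfl
    rw [u1, u2, u3]
    exact hf
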